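-- pv_equiv track=rewrite | github.com/SakshiI10/Python-DSA | Strings/13_Print_Reciprocal.py | reciprocalString
-- ===== SOURCE A (Python) =====
-- def reciprocalString(S):
--     result = []
--     for char in S:
--         if 'A' <= char <= 'Z':
--             reciprocal_char = chr(ord('Z') - (ord(char) - ord('A')))
--             result.append(reciprocal_char)
--         elif 'a' <= char <= 'z':
--             reciprocal_char = chr(ord('z') - (ord(char) - ord('a')))
--             result.append(reciprocal_char)
--         else:
--             result.append(char)
--     return ''.join(result)
-- ===== SOURCE B (Python) =====
-- def reciprocalString(S):
--     # Divide and conquer: split the string in half, mirror each half recursively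
--     # (depth O(log n)); a single character is mirrored by the constant-sum formula
--     # chr(ord('A')+ord('Z')-ord(c)) for its case, non-letters are unchanged.
--     n = len(S)
--     if n == 0:
--         return S
--     if n == 1:
--         if 'A' <= S <= 'Z':
--             return chr(155 - ord(S))   # 155 = ord('A') + ord('Z')
--         if 'a' <= S <= 'z':
--             return chr(219 - ord(S))   # 219 = ord('a') + ord('z')
--         return S
--     m = n // 2
--     return reciprocalString(S[:m]) + reciprocalString(S[m:])
-- ===== Notes on version B (the rewrite author's own statement) =====
-- stated objective: alternative
-- what changed: Replaced A's single left-to-right loop with an append-to-list accumulator by a divide-and-conquer recursion that splits the string in half, mirrors each half recursively and concatenates, with the base case mirroring one character via the constant-sum formula chr(155-ord(c)) / chr(219-ord(c)).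
import Mathlib
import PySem

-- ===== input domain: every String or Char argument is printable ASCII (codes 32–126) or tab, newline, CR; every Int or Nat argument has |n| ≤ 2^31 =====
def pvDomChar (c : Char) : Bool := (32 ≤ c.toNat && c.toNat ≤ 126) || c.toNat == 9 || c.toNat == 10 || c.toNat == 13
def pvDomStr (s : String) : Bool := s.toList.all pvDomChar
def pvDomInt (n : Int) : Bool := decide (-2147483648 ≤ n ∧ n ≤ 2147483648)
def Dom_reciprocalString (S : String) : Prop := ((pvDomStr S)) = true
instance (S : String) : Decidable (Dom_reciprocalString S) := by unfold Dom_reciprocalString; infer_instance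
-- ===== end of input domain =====

-- B replaces A's single accumulator loop by a halving divide-and-conquer recursion with a
-- constant-sum base case; objective: alternative (same result, different decomposition).

-- ===== PORT A =====
-- literal transliteration: loop over chars, branch, append to result list, join
def reciprocalString (S : String) : String :=
  String.mk
    (S.toList.foldl
      (fun result char =>
        if 'A' ≤ char ∧ char ≤ 'Z' then
          result ++ [Char.ofNat ('Z'.toNat - (char.toNat - 'A'.toNat))]
        else if 'a' ≤ char ∧ char ≤ 'z' then
          result ++ [Char.ofNat ('z'.toNat - (char.toNat - 'a'.toNat))]
        else
          result ++ [char])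
      [])

-- ===== PORT B =====
-- Source B's divide-and-conquer on the character list: base cases [] and [c], otherwise split
-- at length/2, recurse on both halves and concatenate.
def recipAux : List Char → List Char
  | [] => []
  | [c] =>
      if 'A' ≤ c ∧ c ≤ 'Z' then [Char.ofNat (155 - c.toNat)]
      else if 'a' ≤ c ∧ c ≤ 'z' then [Char.ofNat (219 - c.toNat)]
      else [c]
  | c :: d :: t =>
      recipAux ((c :: d :: t).take ((c :: d :: t).length / 2)) ++
      recipAux ((c :: d :: t).drop ((c :: d :: t).length / 2))
termination_by l => l.length
decreasing_by
  · simp [List.length_take]; omega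
  · simp; omega

def reciprocalString_alt (S : String) : String := String.mk (recipAux S.toList)

-- ===== PRECONDITION & SPEC =====
def Spec_reciprocalString (S : String) (out : String) : Prop := out = reciprocalString_alt S
instance (S : String) (out : String) : Decidable (Spec_reciprocalString S out) := by unfold Spec_reciprocalString; infer_instance

-- ===== CLAIM (what is proved, stated in full; the proofs are below) =====
def Claim_equal_reciprocalString : Prop := ∀ (S : String), Dom_reciprocalString S → Spec_reciprocalString S (reciprocalString S)

-- ===== LEMMAS AND PROOFS =====

-- A's step function, per character
def recipStep (char : Char) : Char :=
  if 'A' ≤ char ∧ char ≤ 'Z' then Char.ofNat ('Z'.toNat - (char.toNat - 'A'.toNat))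
  else if 'a' ≤ char ∧ char ≤ 'z' then Char.ofNat ('z'.toNat - (char.toNat - 'a'.toNat))
  else char

-- B's base-case mirror, per character
def recipMirror (c : Char) : Char :=
  if 'A' ≤ c ∧ c ≤ 'Z' then Char.ofNat (155 - c.toNat)
  else if 'a' ≤ c ∧ c ≤ 'z' then Char.ofNat (219 - c.toNat)
  else c

lemma foldl_append_map (l : List Char) (acc : List Char) :
    l.foldl
      (fun result char =>
        if 'A' ≤ char ∧ char ≤ 'Z' then
          result ++ [Char.ofNat ('Z'.toNat - (char.toNat - 'A'.toNat))]
        else if 'a' ≤ char ∧ char ≤ 'z' then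
          result ++ [Char.ofNat ('z'.toNat - (char.toNat - 'a'.toNat))]
        else
          result ++ [char])
      acc = acc ++ l.map recipStep := by
  induction l generalizing acc with
  | nil => simp
  | cons c t ih =>
    simp only [List.foldl_cons, List.map_cons, ih]
    unfold recipStep
    split_ifs <;> simp

-- B's divide-and-conquer equals the pointwise map of its base-case mirror
lemma recipAux_eq_map (l : List Char) : recipAux l = l.map recipMirror := by
  induction l using recipAux.induct with
  | case1 => simp [recipAux]
  | case2 c h => simp [recipAux, recipMirror, h]
  | case3 c h1 h2 => simp [recipAux, recipMirror, h1, h2]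
  | case4 c h1 h2 => simp [recipAux, recipMirror, h1, h2]
  | case5 c d t ih1 ih2 =>
    rw [recipAux, ih1, ih2, ← List.map_append, List.take_append_drop]

-- the two per-character mirrors agree on every character code below 128
set_option maxRecDepth 10000 in
lemma pointwise_fin :
    ∀ n : Fin 128, recipStep (Char.ofNat n.val) = recipMirror (Char.ofNat n.val) := by decide

lemma pointwise (c : Char) (h : pvDomChar c = true) : recipStep c = recipMirror c := by
  have hlt : c.toNat < 128 := by
    unfold pvDomChar at h
    simp only [Bool.or_eq_true, Bool.and_eq_true, decide_eq_true_eq, beq_iff_eq] at h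
    omega
  have := pointwise_fin ⟨c.toNat, hlt⟩
  rwa [Char.ofNat_toNat] at this

-- ===== VERDICT (by name: the statement is the Claim_ definition above) =====
theorem reciprocalString_spec : Claim_equal_reciprocalString := by
  intro S hdom
  unfold Spec_reciprocalString reciprocalString reciprocalString_alt
  rw [foldl_append_map, recipAux_eq_map]
  simp only [List.nil_append]
  congr 1
  apply List.map_congr_left
  intro c hc
  have hd : pvDomChar c = true := by
    have := hdom
    unfold Dom_reciprocalString pvDomStr at this
    exact List.all_eq_true.mp this c hc
  exact pointwise c hd
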